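-- pv_equiv track=rewrite | github.com/klopotowskijo/westernarmeniandict | improve_definitions.py | find_templates
-- ===== SOURCE A (Python) =====
-- def find_templates(wikitext):
--     """Yield raw template strings (outermost {{ }}) from wikitext."""
--     depth = 0
--     start = None
--     i = 0
--     while i < len(wikitext):
--         if wikitext[i:i+2] == "{{":
--             if depth == 0:
--                 start = i
--             depth += 1
--             i += 2
--         elif wikitext[i:i+2] == "}}":
--             depth -= 1
--             if depth == 0 and start is not None:
--                 yield wikitext[start:i+2]
--                 start = None
--             i += 2
--         else:
--             i += 1
-- ===== SOURCE B (Python) =====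
-- def _brace_tokens(wikitext):
--     """Yield (position, is_open) for each non-overlapping '{{' / '}}' token,
--     skipping the text between tokens in bulk via str.find."""
--     i = 0
--     while True:
--         o = wikitext.find("{{", i)
--         c = wikitext.find("}}", i)
--         if o == -1 and c == -1:
--             return
--         if c == -1 or (o != -1 and o < c):
--             yield (o, True)
--             i = o + 2
--         else:
--             yield (c, False)
--             i = c + 2
--
--
-- def find_templates(wikitext):
--     """Yield raw template strings (outermost {{ }}) from wikitext."""
--     depth = 0
--     start = None
--     for pos, is_open in _brace_tokens(wikitext):
--         if is_open:
--             if depth == 0: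
--                 start = pos
--             depth += 1
--         else:
--             depth -= 1
--             if depth == 0 and start is not None:
--                 yield wikitext[start:pos + 2]
--                 start = None
-- ===== Notes on version B (the rewrite author's own statement) =====
-- stated objective: faster
-- what changed: Replaces A's char-by-char index walk with slice comparisons by a two-phase pipeline: a str.find-based tokenizer that jumps between double-brace tokens in bulk, whose token stream is folded through the same depth/start state machine.
import Mathlib
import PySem

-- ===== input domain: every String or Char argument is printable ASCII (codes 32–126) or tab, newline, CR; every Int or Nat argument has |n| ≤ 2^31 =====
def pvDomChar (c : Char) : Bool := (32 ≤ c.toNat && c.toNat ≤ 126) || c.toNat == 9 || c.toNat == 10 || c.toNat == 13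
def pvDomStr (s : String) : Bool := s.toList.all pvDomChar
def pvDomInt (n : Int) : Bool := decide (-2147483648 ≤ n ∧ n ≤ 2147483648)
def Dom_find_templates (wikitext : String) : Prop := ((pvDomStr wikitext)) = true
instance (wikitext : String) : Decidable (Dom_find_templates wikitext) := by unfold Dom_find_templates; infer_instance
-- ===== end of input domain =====

-- B replaces A's char-by-char index walk by a str.find-based brace-token stream folded through the same depth/start state machine (measured faster: bulk skipping of non-brace text).


-- ===== PORT A =====
-- literal transliteration of A's while loop: index i over the string, slice comparison
-- wikitext[i:i+2], depth counter, start : Option Nat, yields collected in acc (in order)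
def goA (s : List Char) (depth : Int) (start : Option Nat) (i : Nat) (acc : List String) :
    List String :=
  if _h : i < s.length then
    if (s.drop i).take 2 = ['{', '{'] then
      goA s (depth + 1) (if depth = 0 then some i else start) (i + 2) acc
    else if (s.drop i).take 2 = ['}', '}'] then
      match start with
      | some st =>
          if depth - 1 = 0 then
            goA s (depth - 1) none (i + 2)
              (acc ++ [String.ofList ((s.drop st).take (i + 2 - st))])
          else goA s (depth - 1) (some st) (i + 2) acc
      | none => goA s (depth - 1) none (i + 2) acc
    else goA s depth start (i + 1) acc
  else acc
termination_by s.length - i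

def find_templates (wikitext : String) : List String :=
  goA wikitext.toList 0 none 0 []

-- ===== PORT B =====
-- hand port of str.find("ab", i) restricted to a two-char needle: first absolute
-- position ≥ p (p = absolute position of the list head) where the pair occurs; exact
-- (none plays the role of Python's -1).
def findPair (a b : Char) : List Char → Nat → Option Nat
  | [], _ => none
  | [_], _ => none
  | x :: y :: t, p => if x = a ∧ y = b then some p else findPair a b (y :: t) (p + 1)

theorem findPair_some_ge {a b : Char} : ∀ {l : List Char} {p q : Nat},
    findPair a b l p = some q → p ≤ q ∧ l ≠ [] := by
  intro l
  induction l with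
  | nil => intro p q h; simp [findPair] at h
  | cons x r ih =>
    intro p q h
    cases r with
    | nil => simp [findPair] at h
    | cons y t =>
      simp only [findPair] at h
      split at h
      · simp_all
      · have := ih h
        exact ⟨by omega, by simp⟩

-- port of B's _brace_tokens: nextBrace merges the two finds exactly as the Python
-- 'if c == -1 or (o != -1 and o < c)' choice; rest = suffix of the text starting at
-- absolute position p, both finds recomputed each round exactly as in the Python loop
def nextBrace (rest : List Char) (p : Nat) : Option (Nat × Bool) :=
  match findPair '{' '{' rest p, findPair '}' '}' rest p with
  | none, none => none
  | some q, none => some (q, true)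
  | none, some q => some (q, false)
  | some qo, some qc => if qo < qc then some (qo, true) else some (qc, false)

theorem nextBrace_some_ge {rest : List Char} {p q : Nat} {b : Bool}
    (h : nextBrace rest p = some (q, b)) : p ≤ q ∧ rest ≠ [] := by
  unfold nextBrace at h
  cases ho : findPair '{' '{' rest p with
  | none =>
    cases hc : findPair '}' '}' rest p with
    | none => rw [ho, hc] at h; simp at h
    | some q' =>
      rw [ho, hc] at h
      simp only [Option.some.injEq, Prod.mk.injEq] at h
      obtain ⟨rfl, -⟩ := h
      exact findPair_some_ge hc
  | some q' =>
    cases hc : findPair '}' '}' rest p with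
    | none =>
      rw [ho, hc] at h
      simp only [Option.some.injEq, Prod.mk.injEq] at h
      obtain ⟨rfl, -⟩ := h
      exact findPair_some_ge ho
    | some q'' =>
      rw [ho, hc] at h
      by_cases hlt : q' < q''
      · simp only [hlt, if_true, Option.some.injEq, Prod.mk.injEq] at h
        obtain ⟨rfl, -⟩ := h; exact findPair_some_ge ho
      · simp only [hlt, if_false, Option.some.injEq, Prod.mk.injEq] at h
        obtain ⟨rfl, -⟩ := h; exact findPair_some_ge hc

def tokensB (rest : List Char) (p : Nat) : List (Nat × Bool) :=
  match hn : nextBrace rest p with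
  | none => []
  | some qb => qb :: tokensB (rest.drop (qb.1 + 2 - p)) (qb.1 + 2)
termination_by rest.length
decreasing_by
  obtain ⟨hpq, hne⟩ := nextBrace_some_ge hn
  have : rest.length ≠ 0 := fun h0 => hne (List.length_eq_zero_iff.mp h0)
  simp [List.length_drop]; omega

-- port of B's main loop: fold the depth/start state machine over the token stream
def foldB (s : List Char) : List (Nat × Bool) → Int → Option Nat → List String → List String
  | [], _, _, acc => acc
  | (p, true) :: ts, depth, start, acc =>
      foldB s ts (depth + 1) (if depth = 0 then some p else start) acc
  | (p, false) :: ts, depth, start, acc =>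
      match start with
      | some st =>
          if depth - 1 = 0 then
            foldB s ts (depth - 1) none (acc ++ [String.ofList ((s.drop st).take (p + 2 - st))])
          else foldB s ts (depth - 1) (some st) acc
      | none => foldB s ts (depth - 1) none acc

def find_templates_alt (wikitext : String) : List String :=
  foldB wikitext.toList (tokensB wikitext.toList 0) 0 none []

-- ===== PRECONDITION & SPEC =====
def Spec_find_templates (wikitext : String) (out : List String) : Prop := out = find_templates_alt wikitext
instance (wikitext : String) (out : List String) : Decidable (Spec_find_templates wikitext out) := by unfold Spec_find_templates; infer_instance

-- ===== CLAIM (what is proved, stated in full; the proofs are below) =====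
def Claim_equal_find_templates : Prop := ∀ (wikitext : String), Dom_find_templates wikitext → Spec_find_templates wikitext (find_templates wikitext)

-- ===== LEMMAS AND PROOFS =====

theorem nextBrace_open (t : List Char) (p : Nat) :
    nextBrace ('{' :: '{' :: t) p = some (p, true) := by
  unfold nextBrace
  have ho : findPair '{' '{' ('{' :: '{' :: t) p = some p := by simp [findPair]
  have hc : findPair '}' '}' ('{' :: '{' :: t) p = findPair '}' '}' ('{' :: t) (p + 1) := by
    simp [findPair]
  rw [ho, hc]
  cases hq : findPair '}' '}' ('{' :: t) (p + 1) with
  | none => rfl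
  | some q =>
    have := (findPair_some_ge hq).1
    simp [show p < q from by omega]

theorem nextBrace_close (t : List Char) (p : Nat) :
    nextBrace ('}' :: '}' :: t) p = some (p, false) := by
  unfold nextBrace
  have hc : findPair '}' '}' ('}' :: '}' :: t) p = some p := by simp [findPair]
  have ho : findPair '{' '{' ('}' :: '}' :: t) p = findPair '{' '{' ('}' :: t) (p + 1) := by
    simp [findPair]
  rw [ho, hc]
  cases hq : findPair '{' '{' ('}' :: t) (p + 1) with
  | none => rfl
  | some q =>
    have := (findPair_some_ge hq).1
    simp [show ¬ q < p from by omega]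

theorem tokensB_some (rest : List Char) (p q : Nat) (b : Bool)
    (h : nextBrace rest p = some (q, b)) :
    tokensB rest p = (q, b) :: tokensB (rest.drop (q + 2 - p)) (q + 2) := by
  rw [tokensB.eq_def]
  split
  · rename_i hn; rw [h] at hn; exact absurd hn (by simp)
  · rename_i qb hn
    rw [h] at hn
    simp only [Option.some.injEq] at hn
    subst hn
    rfl

theorem tokensB_open (t : List Char) (p : Nat) :
    tokensB ('{' :: '{' :: t) p = (p, true) :: tokensB t (p + 2) := by
  rw [tokensB_some _ _ _ _ (nextBrace_open t p),
    show p + 2 - p = 2 from by omega]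
  rfl

theorem tokensB_close (t : List Char) (p : Nat) :
    tokensB ('}' :: '}' :: t) p = (p, false) :: tokensB t (p + 2) := by
  rw [tokensB_some _ _ _ _ (nextBrace_close t p),
    show p + 2 - p = 2 from by omega]
  rfl

theorem drop_cons_shift (x : Char) (r : List Char) (p q : Nat) (hq : p + 1 <= q) :
    (x :: r).drop (q + 2 - p) = r.drop (q + 2 - (p + 1)) := by
  rw [show q + 2 - p = (q + 2 - (p + 1)) + 1 from by omega]; simp

theorem tokensB_skip (x : Char) (r : List Char) (p : Nat)
    (hno : findPair '{' '{' (x :: r) p = findPair '{' '{' r (p + 1))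
    (hnc : findPair '}' '}' (x :: r) p = findPair '}' '}' r (p + 1)) :
    tokensB (x :: r) p = tokensB r (p + 1) := by
  have hnb : nextBrace (x :: r) p = nextBrace r (p + 1) := by
    unfold nextBrace; rw [hno, hnc]
  cases hn : nextBrace r (p + 1) with
  | none =>
    rw [tokensB.eq_def]
    split
    · rw [tokensB.eq_def]
      split
      · rfl
      · rename_i qb hn2; rw [hn] at hn2; exact absurd hn2 (by simp)
    · rename_i qb hn2
      rw [hnb, hn] at hn2; exact absurd hn2 (by simp)
  | some qb =>
    obtain ⟨q, b⟩ := qb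
    have h1 := tokensB_some (x :: r) p q b (by rw [hnb, hn])
    have h2 := tokensB_some r (p + 1) q b hn
    rw [h1, h2, drop_cons_shift _ _ _ _ (nextBrace_some_ge hn).1]

theorem tokensB_nil (p : Nat) : tokensB [] p = [] := by
  rw [tokensB.eq_def]
  split
  · rfl
  · rename_i qb hn
    have := (nextBrace_some_ge hn).2
    simp at this

-- findPair makes no match at a head that is not the sought pair
theorem findPair_step {a b x : Char} {r : List Char} {p : Nat}
    (h : ¬ (x = a ∧ r.head? = some b)) :
    findPair a b (x :: r) p = findPair a b r (p + 1) := by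
  cases r with
  | nil => simp [findPair]
  | cons y t =>
    have : ¬ (x = a ∧ y = b) := by simpa using h
    simp [findPair, this]

theorem goA_eq_foldB (s : List Char) (i : Nat) (depth : Int) (start : Option Nat)
    (acc : List String) :
    goA s depth start i acc = foldB s (tokensB (s.drop i) i) depth start acc := by
  rw [goA.eq_def]
  by_cases h : i < s.length
  · rw [dif_pos h]
    have hrest : s.drop i ≠ [] := by
      simp [List.drop_eq_nil_iff]; omega
    cases hr : s.drop i with
    | nil => exact absurd hr hrest
    | cons x r =>
      have hdd : r.drop 1 = s.drop (i + 2) := by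
        have h2 : s.drop (i + 2) = (s.drop i).drop 2 := by rw [List.drop_drop]
        simp [h2, hr]
      have hdd1 : r = s.drop (i + 1) := by
        have h2 : s.drop (i + 1) = (s.drop i).drop 1 := by rw [List.drop_drop]
        simp [h2, hr]
      by_cases hopen : List.take 2 (x :: r) = ['{', '{']
      · -- head is "{{"
        obtain ⟨hx, r', hr'⟩ : x = '{' ∧ ∃ r', r = '{' :: r' := by
          cases r with
          | nil => simp at hopen
          | cons y t =>
            simp only [List.take_succ_cons, List.take_succ_cons, List.take_zero,
              List.cons.injEq, and_true] at hopen
            exact ⟨hopen.1, t, by rw [hopen.2]⟩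
        subst hx; subst hr'
        rw [if_pos hopen, tokensB_open, show r' = s.drop (i + 2) from by
          rw [← hdd]; simp]
        simp only [foldB]
        exact goA_eq_foldB s (i + 2) (depth + 1) (if depth = 0 then some i else start) acc
      · rw [if_neg hopen]
        by_cases hclose : List.take 2 (x :: r) = ['}', '}']
        · obtain ⟨hx, r', hr'⟩ : x = '}' ∧ ∃ r', r = '}' :: r' := by
            cases r with
            | nil => simp at hclose
            | cons y t =>
              simp only [List.take_succ_cons, List.take_succ_cons, List.take_zero,
                List.cons.injEq, and_true] at hclose
              exact ⟨hclose.1, t, by rw [hclose.2]⟩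
          subst hx; subst hr'
          rw [if_pos hclose, tokensB_close, show r' = s.drop (i + 2) from by
            rw [← hdd]; simp]
          simp only [foldB]
          cases start with
          | none => exact goA_eq_foldB s (i + 2) (depth - 1) none acc
          | some st =>
            show (if depth - 1 = 0 then
                goA s (depth - 1) none (i + 2)
                  (acc ++ [String.ofList (List.take (i + 2 - st) (List.drop st s))])
              else goA s (depth - 1) (some st) (i + 2) acc) =
              (if depth - 1 = 0 then
                foldB s (tokensB (List.drop (i + 2) s) (i + 2)) (depth - 1) none
                  (acc ++ [String.ofList (List.take (i + 2 - st) (List.drop st s))])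
              else foldB s (tokensB (List.drop (i + 2) s) (i + 2)) (depth - 1) (some st) acc)
            by_cases hd : depth - 1 = 0
            · rw [if_pos hd, if_pos hd]
              exact goA_eq_foldB s (i + 2) (depth - 1) none _
            · rw [if_neg hd, if_neg hd]
              exact goA_eq_foldB s (i + 2) (depth - 1) (some st) acc
        · -- neither token at position i
          rw [if_neg hclose]
          have hhead : ∀ (a : Char), List.take 2 (x :: r) ≠ [a, a] →
              ¬ (x = a ∧ r.head? = some a) := by
            intro a hne hcontra
            apply hne
            obtain ⟨hx, hhd⟩ := hcontra
            cases r with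
            | nil => simp at hhd
            | cons y t =>
              simp only [List.head?_cons, Option.some.injEq] at hhd
              simp [hx, hhd]
          rw [tokensB_skip x r i
            (findPair_step (hhead '{' hopen))
            (findPair_step (hhead '}' hclose)), hdd1]
          exact goA_eq_foldB s (i + 1) depth start acc
  · rw [dif_neg h]
    have hnil : s.drop i = [] := by
      rw [List.drop_eq_nil_iff]; omega
    rw [hnil, tokensB_nil]
    simp only [foldB]
termination_by s.length - i

-- ===== VERDICT (by name: the statement is the Claim_ definition above) =====
theorem find_templates_spec : Claim_equal_find_templates := by
  intro wikitext _
  show find_templates wikitext = find_templates_alt wikitext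
  unfold find_templates find_templates_alt
  simpa using goA_eq_foldB wikitext.toList 0 0 none []
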